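-- pv_equiv track=rewrite | github.com/Goshin/Yatto | src/yatto.py | create_sc
-- ===== SOURCE A (Python) =====
-- import math
--
-- def create_sc(a, t, b):
--     t = int(math.floor(int(t) / (600 * 1000)))
--     ret = ""
--     for i in range(len(a)):
--         j = ord(a[i]) ^ ord(b[i]) ^ t
--         j %= ord('z')
--         if j < ord('0'):
--             c = chr(ord('0') + j % 9)
--         elif ord('0') <= j <= ord('9'):
--             c = chr(j)
--         elif ord('9') < j < ord('A'):
--             c = '9'
--         elif ord('A') <= j <= ord('Z'):
--             c = chr(j)
--         elif ord('Z') < j < ord('a'):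
--             c = 'Z'
--         elif ord('z') <= j <= ord('z'):
--             c = chr(j)
--         else:
--             c = 'z'
--         ret += c
--     return ret
-- ===== SOURCE B (Python) =====
-- import math
--
-- # Fixed 122-entry translation table: the branch cascade collapses to six contiguous
-- # index ranges, so the table is built piecewise once and the main pass is one lookup.
-- _CHARMAP = (
--     "".join(chr(ord('0') + j % 9) for j in range(ord('0')))          # 0..47
--     + "0123456789"                                                   # 48..57
--     + "9" * (ord('A') - ord('9') - 1)                                # 58..64
--     + "".join(chr(j) for j in range(ord('A'), ord('Z') + 1))         # 65..90
--     + "Z" * (ord('a') - ord('Z') - 1)                                # 91..96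
--     + "z" * (ord('z') - ord('a'))                                    # 97..121
-- )
--
-- def create_sc(a, t, b):
--     t = int(t) // (600 * 1000)
--     return "".join(_CHARMAP[(ord(x) ^ ord(y) ^ t) % ord('z')] for x, y in zip(a, b))
-- ===== Notes on version B (the rewrite author's own statement) =====
-- stated objective: simpler
-- what changed: B replaces the per-character if/elif branch cascade by a fixed 122-entry translation table built once in piecewise segments, so the main pass is a single table lookup per character pair (zip instead of index loop).
import Mathlib
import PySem

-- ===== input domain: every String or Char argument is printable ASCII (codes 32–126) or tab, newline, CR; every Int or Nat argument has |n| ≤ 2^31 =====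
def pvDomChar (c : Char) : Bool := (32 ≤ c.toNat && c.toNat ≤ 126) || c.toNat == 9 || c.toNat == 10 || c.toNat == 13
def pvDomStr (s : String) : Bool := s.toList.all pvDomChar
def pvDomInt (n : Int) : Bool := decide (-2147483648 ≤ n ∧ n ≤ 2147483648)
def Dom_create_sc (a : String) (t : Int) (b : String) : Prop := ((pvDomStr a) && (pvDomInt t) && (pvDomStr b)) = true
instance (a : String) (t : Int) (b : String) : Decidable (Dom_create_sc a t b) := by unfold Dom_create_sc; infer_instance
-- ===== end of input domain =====

-- B replaces A's per-character branch cascade by a fixed 122-entry translation table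
-- built once in piecewise segments; equally fast, simpler main pass (one lookup per char).

-- ===== PORT A =====
-- int(math.floor(int(t)/(600*1000))) equals floor division for |t| ≤ 2^31 (double division
-- is correctly rounded and cannot cross an integer at this magnitude), ported as floordiv.
-- b[i] is ported with pyGetD (default is never used inside Pre_, where i < len b).
def create_sc (a : String) (t : Int) (b : String) : String :=
  let t2 : Int := PySem.Int.floordiv t (600 * 1000)
  let la := a.toList
  let lb := b.toList
  let ret := (List.range la.length).foldl (fun (ret : List Char) (i : Nat) =>
    let j0 : Int := PySem.Int.bxor (PySem.Int.bxor (Int.ofNat (la.getD i ' ').toNat)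
                       (Int.ofNat (PySem.List.pyGetD lb (Int.ofNat i) ' ').toNat)) t2
    let j : Int := PySem.Int.mod j0 122
    let c : Char :=
      if j < 48 then Char.ofNat (48 + PySem.Int.mod j 9).toNat
      else if 48 ≤ j ∧ j ≤ 57 then Char.ofNat j.toNat
      else if 57 < j ∧ j < 65 then '9'
      else if 65 ≤ j ∧ j ≤ 90 then Char.ofNat j.toNat
      else if 90 < j ∧ j < 97 then 'Z'
      else if 122 ≤ j ∧ j ≤ 122 then Char.ofNat j.toNat
      else 'z'
    ret ++ [c]) []
  String.mk ret

-- ===== PORT B =====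
-- _CHARMAP, built piecewise exactly as in Source B
def scCharmap : List Char :=
  (List.range 48).map (fun j => Char.ofNat (48 + j % 9))
  ++ "0123456789".toList
  ++ List.replicate 7 '9'
  ++ (List.range 26).map (fun j => Char.ofNat (65 + j))
  ++ List.replicate 6 'Z'
  ++ List.replicate 25 'z'

def create_sc_alt (a : String) (t : Int) (b : String) : String :=
  let t2 : Int := PySem.Int.floordiv t (600 * 1000)
  String.mk ((a.toList.zip b.toList).map (fun p =>
    scCharmap.getD (PySem.Int.mod
      (PySem.Int.bxor (PySem.Int.bxor (Int.ofNat p.1.toNat) (Int.ofNat p.2.toNat)) t2) 122).toNat ' '))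

-- ===== PRECONDITION & SPEC =====
-- A indexes b[i] for every i < len(a): it raises IndexError when b is shorter than a.
def Pre_create_sc (a : String) (t : Int) (b : String) : Prop :=
  a.toList.length ≤ b.toList.length
instance (a : String) (t : Int) (b : String) : Decidable (Pre_create_sc a t b) := by
  unfold Pre_create_sc; infer_instance
def pvWitness_create_sc : String × Int × String := ("hi", 1200000, "yz")

def Spec_create_sc (a : String) (t : Int) (b : String) (out : String) : Prop := out = create_sc_alt a t b
instance (a : String) (t : Int) (b : String) (out : String) : Decidable (Spec_create_sc a t b out) := by unfold Spec_create_sc; infer_instance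

-- ===== CLAIM (what is proved, stated in full; the proofs are below) =====
def Claim_equal_create_sc : Prop := ∀ (a : String) (t : Int) (b : String), Dom_create_sc a t b → Pre_create_sc a t b → Spec_create_sc a t b (create_sc a t b)

-- ===== LEMMAS AND PROOFS =====

-- A's branch cascade on a reduced index coincides with B's table lookup.
lemma cascade_eq_charmap (n : Nat) (h : n < 122) :
    (let j : Int := (n : Int)
     if j < 48 then Char.ofNat (48 + PySem.Int.mod j 9).toNat
     else if 48 ≤ j ∧ j ≤ 57 then Char.ofNat j.toNat
     else if 57 < j ∧ j < 65 then '9'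
     else if 65 ≤ j ∧ j ≤ 90 then Char.ofNat j.toNat
     else if 90 < j ∧ j < 97 then 'Z'
     else if 122 ≤ j ∧ j ≤ 122 then Char.ofNat j.toNat
     else 'z') = scCharmap.getD n ' ' := by
  interval_cases n <;> decide

-- ===== VERDICT (by name: the statement is the Claim_ definition above) =====
theorem create_sc_spec : Claim_equal_create_sc := by
  intro a t b _ hpre
  unfold Pre_create_sc at hpre
  unfold Spec_create_sc create_sc create_sc_alt
  simp only
  congr 1
  rw [PySem.List.foldl_append_singleton_eq_map]
  simp only [List.nil_append]
  apply List.ext_getElem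
  · simp only [List.length_map, List.length_range, List.length_zip]
    omega
  · intro i h1 h2
    have hia : i < a.toList.length := by simpa using h1
    have hib : i < b.toList.length := by omega
    simp only [List.getElem_map, List.getElem_range, List.getElem_zip]
    simp only [Int.ofNat_eq_natCast, PySem.List.pyGetD_natCast,
      List.getD_eq_getElem a.toList ' ' hia, List.getD_eq_getElem b.toList ' ' hib]
    set x : Int := PySem.Int.bxor (PySem.Int.bxor ((a.toList[i]).toNat : Int)
        ((b.toList[i]).toNat : Int)) (PySem.Int.floordiv t (600 * 1000)) with hx
    have h0 : (0:Int) ≤ PySem.Int.mod x 122 := PySem.Int.mod_nonneg x (by omega)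
    have hlt : PySem.Int.mod x 122 < 122 := PySem.Int.mod_lt x (by omega)
    have hn : (PySem.Int.mod x 122) = Int.ofNat (PySem.Int.mod x 122).toNat :=
      (Int.toNat_of_nonneg h0).symm
    have hnlt : (PySem.Int.mod x 122).toNat < 122 := by omega
    have := cascade_eq_charmap (PySem.Int.mod x 122).toNat hnlt
    simp only at this
    rw [hn]
    exact this
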